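-- pv_equiv track=rewrite | github.com/nju-websoft/KnowLA | KGRetriever.py | is_center_entity
-- ===== SOURCE A (Python) =====
-- def is_center_entity(entity, word, morphy_set, is_morphy):
--     if len(str(entity).split("'")) == 3:
--         tmp = str(entity).split("'")[1]
--     else:
--         tmp = str(entity).replace("')", "('").split("('")[1]
--
--     # if is_filter and not self.is_in_full_wn18(tmp):
--     #     return False
--
--     tmp = tmp.split(".")
--     if len(tmp) == 3:
--         if is_morphy:
--             return tmp[0] in morphy_set
--         else:
--             return tmp[0] == word
--     else:
--         tmp2 = ""
--         for i, substring in enumerate(tmp):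
--             if i >= len(tmp)-2:
--                 break
--             tmp2 += substring
--         if is_morphy:
--             return tmp2 in morphy_set
--         else:
--             return tmp2 == word
-- ===== SOURCE B (Python) =====
-- def is_center_entity(entity, word, morphy_set, is_morphy):
--     s = str(entity)
--     q = s.split("'")
--     tmp = q[1] if len(q) == 3 else s.replace("')", "('").split("('")[1]
--     # key = chars before the second-to-last '.', dots dropped, via one
--     # right-to-left scan with a saturating dot counter (no split of tmp)
--     dots = 0
--     out = []
--     for ch in reversed(tmp):
--         if dots >= 2:
--             if ch != ".":
--                 out.append(ch)
--         elif ch == ".":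
--             dots += 1
--     key = "".join(reversed(out))
--     return (key in morphy_set) if is_morphy else (key == word)
-- ===== Notes on version B (the rewrite author's own statement) =====
-- stated objective: alternative
-- what changed: B replaces A's split-on-'.' with its len==3 special case and concatenation break-loop by a single right-to-left character scan with a saturating dot counter that collects the key directly, never building the parts list.
import Mathlib
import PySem

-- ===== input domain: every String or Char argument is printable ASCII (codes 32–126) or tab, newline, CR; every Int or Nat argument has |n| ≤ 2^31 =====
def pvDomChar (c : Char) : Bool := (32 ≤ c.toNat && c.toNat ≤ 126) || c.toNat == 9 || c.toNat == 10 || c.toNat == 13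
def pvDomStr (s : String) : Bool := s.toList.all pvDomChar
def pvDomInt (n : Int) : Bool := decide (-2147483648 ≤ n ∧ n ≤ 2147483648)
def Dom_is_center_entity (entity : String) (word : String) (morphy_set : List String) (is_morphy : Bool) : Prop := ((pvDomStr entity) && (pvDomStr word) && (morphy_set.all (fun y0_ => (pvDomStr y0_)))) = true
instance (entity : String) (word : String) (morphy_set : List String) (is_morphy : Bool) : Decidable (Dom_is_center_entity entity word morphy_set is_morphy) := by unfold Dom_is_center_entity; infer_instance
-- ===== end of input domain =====

-- B keeps A's parsing of the quoted name but replaces A's split-on-'.' /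
-- len==3 branch / concatenation loop by ONE right-to-left character scan with a
-- saturating dot counter; objective: alternative (same cost, no parts list built).

-- ===== PORT A =====

-- A's first parsing block (shared verbatim by both Pythons):
-- str(entity).split("'")[1] if it has 3 pieces, else
-- str(entity).replace("')", "('").split("('")[1].  The .getD defaults are never
-- reached inside Pre_ (Python raises IndexError exactly there); split? is some
-- because both separators are nonempty.
def pvParseA (entity : String) : String :=
  let q := (PySem.Str.split? entity "'").getD []
  if q.length == 3 then
    (PySem.List.pyGet? q 1).getD ""
  else
    (PySem.List.pyGet? ((PySem.Str.split? (PySem.Str.replace entity "')" "('") "('").getD []) 1).getD ""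

-- the for-loop with its break: 'for i, substring in enumerate(tmp): if i >= len(tmp)-2: break; tmp2 += substring'
def pvLoopA (n : Int) : List (Int × String) → String → String
  | [], acc => acc
  | (i, sub) :: rest, acc => if i ≥ n - 2 then acc else pvLoopA n rest (acc ++ sub)

def is_center_entity (entity : String) (word : String) (morphy_set : List String) (is_morphy : Bool) : Bool :=
  let tmp := pvParseA entity
  let parts := (PySem.Str.split? tmp ".").getD []
  if parts.length == 3 then
    if is_morphy then morphy_set.contains ((PySem.List.pyGet? parts 0).getD "")
    else ((PySem.List.pyGet? parts 0).getD "") == word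
  else
    let tmp2 := pvLoopA (parts.length : Int) (PySem.List.enumerate parts 0) ""
    if is_morphy then morphy_set.contains tmp2 else tmp2 == word

-- ===== PORT B =====
-- B's scan: 'for ch in reversed(tmp)' with state (dots, out); out is a Python
-- list of 1-char strings, joined (reversed) at the end.
def is_center_entity_alt (entity : String) (word : String) (morphy_set : List String) (is_morphy : Bool) : Bool :=
  let tmp := pvParseA entity
  let st := tmp.toList.reverse.foldl
      (fun (st : Int × List String) ch =>
        if st.1 ≥ 2 then (if ch ≠ '.' then (st.1, st.2 ++ [String.ofList [ch]]) else st)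
        else if ch = '.' then (st.1 + 1, st.2) else st)
      (0, [])
  let key := PySem.Str.join "" st.2.reverse
  if is_morphy then morphy_set.contains key else key == word

-- ===== PRECONDITION & SPEC =====
-- Pre_ excludes exactly the inputs where Python A raises IndexError: entity does not
-- split into 3 pieces on "'" and, after replacing "')" by "('", contains no "('".
def Pre_is_center_entity (entity : String) (word : String) (morphy_set : List String) (is_morphy : Bool) : Prop :=
  ((PySem.Str.split? entity "'").getD []).length = 3 ∨
  2 ≤ ((PySem.Str.split? (PySem.Str.replace entity "')" "('") "('").getD []).length
instance (entity : String) (word : String) (morphy_set : List String) (is_morphy : Bool) : Decidable (Pre_is_center_entity entity word morphy_set is_morphy) := by unfold Pre_is_center_entity; infer_instance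

def pvWitness_is_center_entity : String × String × List String × Bool := ("('dog.n.01')", "dog", ["dog"], false)

def Spec_is_center_entity (entity : String) (word : String) (morphy_set : List String) (is_morphy : Bool) (out : Bool) : Prop := out = is_center_entity_alt entity word morphy_set is_morphy
instance (entity : String) (word : String) (morphy_set : List String) (is_morphy : Bool) (out : Bool) : Decidable (Spec_is_center_entity entity word morphy_set is_morphy out) := by unfold Spec_is_center_entity; infer_instance

-- ===== CLAIM (what is proved, stated in full; the proofs are below) =====
def Claim_equal_is_center_entity : Prop := ∀ (entity : String) (word : String) (morphy_set : List String) (is_morphy : Bool), Dom_is_center_entity entity word morphy_set is_morphy → Pre_is_center_entity entity word morphy_set is_morphy → Spec_is_center_entity entity word morphy_set is_morphy (is_center_entity entity word morphy_set is_morphy)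

-- ===== LEMMAS AND PROOFS =====

-- simple recursive characterisation of split-on-'.'
def pvSplitChar : List Char → List (List Char)
  | [] => [[]]
  | c :: rest =>
    if c = '.' then [] :: pvSplitChar rest
    else match pvSplitChar rest with
      | [] => [[c]]
      | h :: t => (c :: h) :: t

-- the key both programs compute, char-level: chars strictly before the
-- second-to-last '.', with '.' dropped; [] if fewer than two dots
def pvKeyChars : List Char → List Char
  | [] => []
  | c :: rest =>
    if 2 ≤ rest.count '.' then
      (if c = '.' then pvKeyChars rest else c :: pvKeyChars rest)
    else []

theorem pvSplitChar_ne_nil (cs : List Char) : pvSplitChar cs ≠ [] := by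
  cases cs with
  | nil => simp [pvSplitChar]
  | cons c rest =>
    simp only [pvSplitChar]
    split
    · simp
    · cases h : pvSplitChar rest <;> simp

theorem pvLen_pvSplitChar (cs : List Char) :
    (pvSplitChar cs).length = cs.count '.' + 1 := by
  induction cs with
  | nil => simp [pvSplitChar]
  | cons c rest ih =>
    simp only [pvSplitChar]
    by_cases h : c = '.'
    · simp [h, ih]
    · cases hr : pvSplitChar rest with
      | nil => exact absurd hr (pvSplitChar_ne_nil rest)
      | cons a t =>
        have := ih
        rw [hr] at this
        simp [h, ← this]

def pvConsHd (p : List Char) : List (List Char) → List (List Char)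
  | [] => [p]
  | h :: t => (p ++ h) :: t

theorem pvGo_eq (fuel : Nat) (l cur : List Char) (acc : List (List Char))
    (hf : l.length < fuel) :
    PySem.Chars.splitOn.go ['.'] fuel l cur acc
      = acc.reverse ++ pvConsHd cur.reverse (pvSplitChar l) := by
  induction fuel generalizing l cur acc with
  | zero => omega
  | succ f ih =>
    cases l with
    | nil =>
      rw [PySem.Chars.splitOn.go]
      all_goals simp [pvSplitChar, pvConsHd]
    | cons c rest =>
      rw [PySem.Chars.splitOn.go]
      by_cases hc : c = '.'
      · have hpre : (['.'] : List Char).isPrefixOf (c :: rest) = true := by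
          simp [List.isPrefixOf, hc]
        simp only [hpre, if_pos]
        rw [ih _ _ _ (by simp at hf ⊢; omega)]
        cases hs : pvSplitChar rest with
        | nil => exact absurd hs (pvSplitChar_ne_nil rest)
        | cons h t => simp [pvSplitChar, hc, hs, pvConsHd]
      · have hpre : (['.'] : List Char).isPrefixOf (c :: rest) = false := by
          simp [List.isPrefixOf]
          exact fun h => hc h.symm
        simp only [hpre, Bool.false_eq_true, if_false]
        rw [ih _ _ _ (by simp at hf ⊢; omega)]
        cases hs : pvSplitChar rest with
        | nil => exact absurd hs (pvSplitChar_ne_nil rest)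
        | cons h t => simp [pvSplitChar, hc, hs, pvConsHd]

theorem pvSplitOn_dot (cs : List Char) :
    PySem.Chars.splitOn cs ['.'] = pvSplitChar cs := by
  unfold PySem.Chars.splitOn
  rw [pvGo_eq _ _ _ _ (by omega)]
  cases hs : pvSplitChar cs with
  | nil => exact absurd hs (pvSplitChar_ne_nil cs)
  | cons h t => simp [pvConsHd]

theorem pvKeyChars_of_lt (cs : List Char) (h : cs.count '.' < 2) :
    pvKeyChars cs = [] := by
  cases cs with
  | nil => simp [pvKeyChars]
  | cons c rest =>
    have : ¬ 2 ≤ rest.count '.' := by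
      simp only [List.count_cons] at h
      omega
    simp [pvKeyChars, this]

-- A's value: join of all but the last two pieces, char-level = pvKeyChars
theorem pvJoinTake_eq_key (cs : List Char) :
    PySem.Chars.join [] ((pvSplitChar cs).take ((pvSplitChar cs).length - 2))
      = pvKeyChars cs := by
  induction cs with
  | nil => simp [pvSplitChar, pvKeyChars, PySem.Chars.join_nil]
  | cons c rest ih =>
    have hlen := pvLen_pvSplitChar rest
    cases hs : pvSplitChar rest with
    | nil => exact absurd hs (pvSplitChar_ne_nil rest)
    | cons h t =>
      rw [hs] at ih hlen
      simp only [List.length_cons] at ih hlen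
      by_cases hc : c = '.'
      · -- pvSplitChar (c::rest) = [] :: h :: t
        have hsplit : pvSplitChar (c :: rest) = [] :: h :: t := by
          simp [pvSplitChar, hc, hs]
        rw [hsplit]
        simp only [List.length_cons]
        by_cases h2 : 2 ≤ rest.count '.'
        · -- t.length + 1 + 1 - 2 = t.length + 1 ≥ 2, take keeps [] and ≥1 more
          have ht1 : 1 ≤ t.length := by omega
          have htake : (([] : List Char) :: h :: t).take (t.length + 1 + 1 - 2)
              = [] :: (h :: t).take (t.length + 1 - 2) := by
            have : t.length + 1 + 1 - 2 = (t.length + 1 - 2) + 1 := by omega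
            rw [this, List.take_succ_cons]
          rw [htake]
          have hnonnil : (h :: t).take (t.length + 1 - 2) ≠ [] := by
            simp [List.take_eq_nil_iff]
            omega
          cases htk : (h :: t).take (t.length + 1 - 2) with
          | nil => exact absurd htk hnonnil
          | cons a u =>
            rw [PySem.Chars.join_cons_cons]
            rw [htk] at ih
            simp [pvKeyChars, h2, hc, ← ih]
        · -- fewer than two dots in rest: everything degenerates to []
          have : t.length = 0 ∨ t.length = 1 := by omega
          rcases this with h0 | h1
          · match t, h0 with
            | [], _ => simp [pvKeyChars, h2]
          · match t, h1 with
            | [x], _ => simp [pvKeyChars, h2]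
      · have hsplit : pvSplitChar (c :: rest) = (c :: h) :: t := by
          simp [pvSplitChar, hc, hs]
        rw [hsplit]
        simp only [List.length_cons] at ih ⊢
        by_cases h2 : 2 ≤ rest.count '.'
        · have ht1 : 2 ≤ t.length := by omega
          have htake : ((c :: h) :: t).take (t.length + 1 - 2)
              = (c :: h) :: t.take (t.length + 1 - 3) := by
            have : t.length + 1 - 2 = (t.length + 1 - 3) + 1 := by omega
            rw [this, List.take_succ_cons]
          rw [htake]
          -- rewrite ih's take the same way
          have htake2 : (h :: t).take (t.length + 1 - 2)
              = h :: t.take (t.length + 1 - 3) := by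
            have : t.length + 1 - 2 = (t.length + 1 - 3) + 1 := by omega
            rw [this, List.take_succ_cons]
          rw [htake2] at ih
          by_cases ht3 : t.length + 1 - 3 = 0
          · rw [ht3] at ih ⊢
            simp only [List.take_zero] at ih ⊢
            rw [PySem.Chars.join_singleton] at ih ⊢
            simp [pvKeyChars, h2, hc, ← ih]
          · have htne : t ≠ [] := by
              intro hnil
              rw [hnil] at ht1
              simp at ht1
            have hnonnil : t.take (t.length + 1 - 3) ≠ [] := by
              simp [List.take_eq_nil_iff, htne]
              omega
            cases htk : t.take (t.length + 1 - 3) with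
            | nil => exact absurd htk hnonnil
            | cons a u =>
              rw [htk] at ih
              rw [PySem.Chars.join_cons_cons] at ih ⊢
              simp [pvKeyChars, h2, hc, ← ih]
        · have : t.length = 0 ∨ t.length = 1 := by omega
          rcases this with h0 | h1
          · match t, h0 with
            | [], _ => simp [pvKeyChars, h2]
          · match t, h1 with
            | [x], _ => simp [pvKeyChars, h2]

-- B's scan as a foldr (the reversed-foldl), fully characterised
theorem pvScan_eq (cs : List Char) :
    cs.foldr
      (fun ch (st : Int × List String) =>
        if st.1 ≥ 2 then (if ch ≠ '.' then (st.1, st.2 ++ [String.ofList [ch]]) else st)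
        else if ch = '.' then (st.1 + 1, st.2) else st)
      ((0 : Int), ([] : List String))
    = ((if 2 ≤ cs.count '.' then (2 : Int) else (cs.count '.' : Int)),
       ((pvKeyChars cs).map (fun c => String.ofList [c])).reverse) := by
  induction cs with
  | nil => simp [pvKeyChars]
  | cons c rest ih =>
    rw [List.foldr_cons, ih]
    by_cases h2 : 2 ≤ rest.count '.'
    · have h2' : 2 ≤ (c :: rest).count '.' := by
        simp only [List.count_cons]
        omega
      rw [if_pos h2, if_pos h2', if_pos (show ((2:Int) ≥ 2) by norm_num)]
      by_cases hc : c = '.'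
      · rw [if_neg (show ¬ (c ≠ '.') by simp [hc])]
        simp [pvKeyChars, h2, hc]
      · rw [if_pos (show (c ≠ '.') from hc)]
        simp [pvKeyChars, h2, hc]
    · have hkey : pvKeyChars rest = [] := pvKeyChars_of_lt rest (by omega)
      rw [if_neg h2, if_neg (show ¬ (((rest.count '.' : Nat) : Int) ≥ 2) by omega)]
      by_cases hc : c = '.'
      · have hcnt : (c :: rest).count '.' = rest.count '.' + 1 := by
          simp [hc]
        have hk2 : pvKeyChars (c :: rest) = [] := by simp [pvKeyChars, h2]
        rw [if_pos hc, hk2, hkey, hcnt]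
        by_cases h1 : 2 ≤ rest.count '.' + 1
        · rw [if_pos h1]
          refine Prod.ext ?_ ?_
          · omega
          · simp
        · rw [if_neg h1]
          refine Prod.ext ?_ ?_
          · push_cast
            omega
          · simp
      · have hcnt : (c :: rest).count '.' = rest.count '.' := by
          simp [hc]
        have hk2 : pvKeyChars (c :: rest) = [] := by simp [pvKeyChars, h2]
        rw [if_neg hc, hk2, hkey, hcnt, if_neg h2]

-- A-side plumbing (unchanged from the straightforward reading of A's code)
theorem pvJoin_empty_nil : PySem.Str.join "" [] = "" := rfl

theorem pvJoin_empty_cons (a : String) (l : List String) :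
    PySem.Str.join "" (a :: l) = a ++ PySem.Str.join "" l := by
  cases l with
  | nil => simp [PySem.Str.join, PySem.Chars.join, List.intercalate]
  | cons b t => simp [PySem.Str.join, PySem.Chars.join, List.intercalate]

theorem pvLoopA_eq (xs : List String) (n k : Int) (acc : String) :
    pvLoopA n (PySem.List.enumerate xs k) acc = acc ++ PySem.Str.join "" (xs.take (n - 2 - k).toNat) := by
  induction xs generalizing k acc with
  | nil => simp [PySem.List.enumerate, pvLoopA, pvJoin_empty_nil]
  | cons x xs ih =>
    simp only [PySem.List.enumerate, pvLoopA]
    by_cases h : k ≥ n - 2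
    · have : (n - 2 - k).toNat = 0 := by omega
      simp [h, this, pvJoin_empty_nil]
    · have h1 : (n - 2 - k).toNat = (n - 2 - (k + 1)).toNat + 1 := by omega
      simp only [h, ih, h1, List.take_succ_cons, pvJoin_empty_cons]
      simp [String.append_assoc]

-- the parts A works on, expressed through pvSplitChar
theorem pvParts_eq (tmp : String) :
    (PySem.Str.split? tmp ".").getD []
      = (pvSplitChar tmp.toList).map String.ofList := by
  simp [PySem.Str.split?, PySem.Chars.split?, pvSplitOn_dot]

-- A's key (in either branch) and B's key are the same string
theorem pvAKey_toList (tmp : String) :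
    (PySem.Str.join ""
        (((pvSplitChar tmp.toList).map String.ofList).take
          (((pvSplitChar tmp.toList).map String.ofList).length - 2))).toList
      = pvKeyChars tmp.toList := by
  rw [PySem.Str.toList_join, List.length_map, ← List.map_take, List.map_map]
  have : (String.toList ∘ String.ofList) = id := by
    funext l
    simp
  rw [this, List.map_id]
  simpa using pvJoinTake_eq_key tmp.toList

theorem pvBKey_toList (tmp : String) :
    (PySem.Str.join ""
        ((((pvKeyChars tmp.toList).map (fun c => String.ofList [c])).reverse).reverse)).toList
      = pvKeyChars tmp.toList := by
  rw [List.reverse_reverse, PySem.Str.toList_join, List.map_map]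
  have : (String.toList ∘ fun c => String.ofList [c]) = fun c => [c] := by
    funext c
    simp
  rw [this]
  simp [PySem.Chars.join_nil_singletons]

theorem pvStr_eq_of_toList {a b : String} (h : a.toList = b.toList) : a = b := by
  have := congrArg String.ofList h
  simpa using this

-- ===== VERDICT (by name: the statement is the Claim_ definition above) =====
theorem is_center_entity_spec : Claim_equal_is_center_entity := by
  intro entity word morphy_set is_morphy _ _
  unfold Spec_is_center_entity is_center_entity is_center_entity_alt
  dsimp only
  set tmp := pvParseA entity with htmp
  -- B's key equals pvKeyChars tmp.toList as a string
  have hB : PySem.Str.join ""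
      (tmp.toList.reverse.foldl
        (fun (st : Int × List String) ch =>
          if st.1 ≥ 2 then (if ch ≠ '.' then (st.1, st.2 ++ [String.ofList [ch]]) else st)
          else if ch = '.' then (st.1 + 1, st.2) else st)
        ((0 : Int), ([] : List String))).2.reverse
      = String.ofList (pvKeyChars tmp.toList) := by
    rw [List.foldl_reverse]
    have := pvScan_eq tmp.toList
    simp only [this]
    apply pvStr_eq_of_toList
    rw [String.toList_ofList]
    exact pvBKey_toList tmp
  rw [hB]
  -- A's key equals the same string in both branches
  rw [pvParts_eq tmp]
  set P := pvSplitChar tmp.toList with hP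
  have hA : ∀ s : String,
      s = PySem.Str.join "" ((P.map String.ofList).take ((P.map String.ofList).length - 2)) →
      s = String.ofList (pvKeyChars tmp.toList) := by
    intro s hs
    rw [hs]
    apply pvStr_eq_of_toList
    rw [String.toList_ofList]
    exact pvAKey_toList tmp
  by_cases h3 : (P.map String.ofList).length = 3
  · have hPl : P.length = 3 := by simpa using h3
    match P, hPl with
    | [a, b, c], _ =>
      have hkey : (PySem.List.pyGet? ([a,b,c].map String.ofList) 0).getD ""
          = String.ofList (pvKeyChars tmp.toList) := by
        apply hA
        simp only [PySem.List.pyGet?, PySem.List.pyIdx?, List.length_map, List.length_cons,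
          List.length_nil]
        simp [pvJoin_empty_cons, pvJoin_empty_nil]
      simp only [List.length_map, List.length_cons, List.length_nil] at *
      simp only [PySem.List.pyGet?, PySem.List.pyIdx?] at hkey ⊢
      simp only [hkey]
      simp
  · have hne : ((P.map String.ofList).length == 3) = false := by
      simp only [List.length_map] at h3 ⊢
      simp [h3]
    rw [hne]
    have hloop : pvLoopA ((P.map String.ofList).length : Int)
        (PySem.List.enumerate (P.map String.ofList) 0) ""
        = String.ofList (pvKeyChars tmp.toList) := by
      apply hA
      rw [pvLoopA_eq]
      have : (((P.map String.ofList).length : Int) - 2 - 0).toNat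
          = (P.map String.ofList).length - 2 := by omega
      rw [this]
      simp
    rw [hloop]
    simp
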